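-- pv_equiv track=rewrite | github.com/VahagnSyan/Python | Homework_3/Exercise_16.py | get_uniq_list
-- ===== SOURCE A (Python) =====
-- def get_uniq_list(some_list):
--     element_count = {}
--     uniq_list = []
--
--     for i in some_list:
--         element_count[i] = element_count.get(i, 0) + 1
--
--     for key, value in element_count.items():
--         if value == 1:
--             uniq_list.append(key)
--
--     return uniq_list
-- ===== SOURCE B (Python) =====
-- def get_uniq_list(some_list):
--     seen = set()
--     duplicated = set()
--     for x in some_list:
--         if x in seen:
--             duplicated.add(x)
--         else:
--             seen.add(x)
--     return [x for x in some_list if x in seen and x not in duplicated]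
-- ===== Notes on version B (the rewrite author's own statement) =====
-- stated objective: idiomatic
-- what changed: Replaces the count dictionary and the dict-items pass with two membership sets (seen/duplicated) built in one pass, and emits the result by a second scan of the original list instead of iterating the dict.
import Mathlib
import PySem

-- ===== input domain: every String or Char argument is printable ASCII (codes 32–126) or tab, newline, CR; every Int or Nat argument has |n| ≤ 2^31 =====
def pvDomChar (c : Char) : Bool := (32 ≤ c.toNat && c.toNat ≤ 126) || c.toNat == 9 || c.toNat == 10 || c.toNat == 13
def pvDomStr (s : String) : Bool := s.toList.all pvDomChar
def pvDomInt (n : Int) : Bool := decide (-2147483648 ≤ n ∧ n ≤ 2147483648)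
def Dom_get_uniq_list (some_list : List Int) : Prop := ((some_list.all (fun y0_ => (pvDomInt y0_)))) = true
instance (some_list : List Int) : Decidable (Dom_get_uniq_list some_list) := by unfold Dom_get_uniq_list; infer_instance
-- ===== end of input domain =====

-- B replaces A's count dictionary with two membership sets (seen/duplicated) built in one
-- pass and emits the result by a second scan of the original list (idiomatic; same cost).

-- ===== PORT A =====
def get_uniq_list (some_list : List Int) : List Int :=
  let element_count : PySem.Dict Int Int :=
    some_list.foldl (fun d i => d.insert i (d.getD i 0 + 1)) PySem.Dict.empty
  element_count.items.foldl (fun acc kv => if kv.2 == 1 then acc ++ [kv.1] else acc) []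

-- ===== PORT B =====
def get_uniq_list_alt (some_list : List Int) : List Int :=
  let st : PySem.Set Int × PySem.Set Int :=
    some_list.foldl
      (fun st x =>
        if st.1.contains x then (st.1, PySem.Set.add st.2 x) else (PySem.Set.add st.1 x, st.2))
      (PySem.Set.empty, PySem.Set.empty)
  some_list.filter (fun x => st.1.contains x && !st.2.contains x)

-- ===== PRECONDITION & SPEC =====
def Spec_get_uniq_list (some_list : List Int) (out : List Int) : Prop := out = get_uniq_list_alt some_list
instance (some_list : List Int) (out : List Int) : Decidable (Spec_get_uniq_list some_list out) := by unfold Spec_get_uniq_list; infer_instance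

-- ===== CLAIM (what is proved, stated in full; the proofs are below) =====
def Claim_equal_get_uniq_list : Prop := ∀ (some_list : List Int), Dom_get_uniq_list some_list → Spec_get_uniq_list some_list (get_uniq_list some_list)

-- ===== LEMMAS AND PROOFS =====

-- B's loop step
def pvStep (st : PySem.Set Int × PySem.Set Int) (x : Int) : PySem.Set Int × PySem.Set Int :=
  if st.1.contains x then (st.1, PySem.Set.add st.2 x) else (PySem.Set.add st.1 x, st.2)

theorem pvStep_fst (st : PySem.Set Int × PySem.Set Int) (x : Int) :
    (pvStep st x).1 = PySem.Set.add st.1 x := by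
  unfold pvStep PySem.Set.add
  split_ifs with h <;> simp_all

theorem pv_fold_fst (l : List Int) (s d : PySem.Set Int) :
    (l.foldl pvStep (s, d)).1 = PySem.Set.update s l := by
  induction l generalizing s d with
  | nil => rfl
  | cons x xs ih =>
    simp only [List.foldl_cons, PySem.Set.update]
    have : pvStep (s, d) x = ((pvStep (s, d) x).1, (pvStep (s, d) x).2) := rfl
    rw [this, ih, pvStep_fst]
    rfl

theorem pv_fold_snd_mem (l : List Int) (s d : PySem.Set Int) (y : Int) :
    y ∈ (l.foldl pvStep (s, d)).2 ↔ y ∈ d ∨ (y ∈ s ∧ y ∈ l) ∨ 2 ≤ l.count y := by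
  induction l generalizing s d with
  | nil => simp
  | cons x xs ih =>
    simp only [List.foldl_cons]
    by_cases hx : s.contains x = true
    · have hxs : x ∈ s := by simpa [PySem.Set.contains] using hx
      have hstep : pvStep (s, d) x = (s, PySem.Set.add d x) := by
        unfold pvStep; rw [if_pos hx]
      rw [hstep, ih]
      by_cases hyx : y = x
      · subst hyx
        simp [PySem.Set.mem_add, List.count_cons_self, hxs]
      · have hxy : ¬x = y := fun h => hyx h.symm
        simp [PySem.Set.mem_add, hyx, hxy]
    · have hxs : x ∉ s := by simpa [PySem.Set.contains] using hx
      have hstep : pvStep (s, d) x = (PySem.Set.add s x, d) := by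
        unfold pvStep; rw [if_neg hx]
      rw [hstep, ih]
      by_cases hyx : y = x
      · subst hyx
        simp [List.count_cons_self, hxs]
        constructor
        · rintro (hd | hm | hc)
          · exact Or.inl hd
          · exact Or.inr hm
          · exact Or.inr (List.count_pos_iff.mp (by omega))
        · rintro (hd | hm)
          · exact Or.inl hd
          · exact Or.inr (Or.inl hm)
      · have hxy : ¬x = y := fun h => hyx h.symm
        simp [PySem.Set.mem_add, hyx, hxy]

-- ofList l is a sublist of l
theorem pv_foldl_add_sublist (l : List Int) (s : List Int) :
    (l.foldl PySem.Set.add s).Sublist (s ++ l) := by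
  induction l generalizing s with
  | nil => simp
  | cons x xs ih =>
    have h1 : (xs.foldl PySem.Set.add (PySem.Set.add s x)).Sublist (PySem.Set.add s x ++ xs) := ih _
    have h2 : (PySem.Set.add s x).Sublist (s ++ [x]) := by
      unfold PySem.Set.add
      split_ifs with h
      · exact List.sublist_append_left s [x]
      · exact List.Sublist.refl _
    have h3 : (PySem.Set.add s x ++ xs).Sublist (s ++ x :: xs) := by
      simpa using h2.append_right xs
    simpa using h1.trans h3

theorem pv_ofList_sublist (l : List Int) : (PySem.Set.ofList l).Sublist l := by
  have := pv_foldl_add_sublist l []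
  simpa [PySem.Set.ofList_eq_foldl] using this

theorem pv_count_ofList (l : List Int) (x : Int) :
    (PySem.Set.ofList l).count x = if x ∈ l then 1 else 0 := by
  by_cases h : x ∈ l
  · rw [if_pos h]
    exact List.count_eq_one_of_mem (PySem.Set.nodup_ofList l)
      (by simpa [PySem.Set.mem_ofList] using h)
  · rw [if_neg h]
    exact List.count_eq_zero.mpr (by simpa [PySem.Set.mem_ofList] using h)

-- key lemma: filtering by a predicate that only holds on once-occurring elements
-- gives the same result on the deduplicated list as on the original list
theorem pv_filter_ofList (l : List Int) (p : Int → Bool)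
    (hp : ∀ x, p x = true → l.count x ≤ 1) :
    (PySem.Set.ofList l).filter p = l.filter p := by
  have hsub : ((PySem.Set.ofList l).filter p).Sublist (l.filter p) :=
    (pv_ofList_sublist l).filter p
  have hcount : ∀ x, ((PySem.Set.ofList l).filter p).count x = (l.filter p).count x := by
    intro x
    by_cases hpx : p x = true
    · rw [List.count_filter hpx, List.count_filter hpx, pv_count_ofList]
      by_cases hm : x ∈ l
      · have h1 : 1 ≤ l.count x := List.count_pos_iff.mpr hm
        have h2 := hp x hpx
        rw [if_pos hm]; omega
      · rw [if_neg hm, List.count_eq_zero.mpr hm]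
    · rw [List.count_eq_zero.mpr, List.count_eq_zero.mpr]
      · intro hm; exact hpx (List.of_mem_filter hm)
      · intro hm; exact hpx (List.of_mem_filter hm)
  have hperm : ((PySem.Set.ofList l).filter p).Perm (l.filter p) :=
    List.perm_iff_count.mpr hcount
  exact hsub.eq_of_length hperm.length_eq

theorem pv_A_eq (l : List Int) :
    get_uniq_list l = (PySem.Set.ofList l).filter (fun k => decide (l.count k = 1)) := by
  unfold get_uniq_list
  have hc : l.foldl (fun d i => d.insert i (d.getD i 0 + 1)) PySem.Dict.empty
      = PySem.Dict.counter l := rfl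
  rw [hc, PySem.List.foldl_append_if, PySem.Dict.items_counter, List.filter_map, List.map_map]
  rw [show ((Prod.fst ∘ fun k : Int => (k, (l.count k : Int)))) = id from rfl]
  rw [List.map_id]
  apply List.filter_congr
  intro x _
  simp only [Function.comp_apply]
  by_cases h : l.count x = 1 <;> simp [h]

theorem pv_B_eq (l : List Int) :
    get_uniq_list_alt l = l.filter (fun k => decide (l.count k = 1)) := by
  unfold get_uniq_list_alt
  rw [show (fun (st : PySem.Set Int × PySem.Set Int) x =>
      if st.1.contains x then (st.1, PySem.Set.add st.2 x)
      else (PySem.Set.add st.1 x, st.2)) = pvStep from rfl]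
  apply List.filter_congr
  intro x hx
  have h1 : (l.foldl pvStep (PySem.Set.empty, PySem.Set.empty)).1.contains x = true := by
    rw [show ((PySem.Set.empty : PySem.Set Int), (PySem.Set.empty : PySem.Set Int))
        = (([] : List Int), ([] : List Int)) from rfl]
    rw [pv_fold_fst, PySem.Set.update_nil_left]
    simpa [PySem.Set.contains, PySem.Set.mem_ofList] using hx
  have h2 : (l.foldl pvStep (PySem.Set.empty, PySem.Set.empty)).2.contains x
      = decide (2 ≤ l.count x) := by
    simp only [PySem.Set.contains]
    by_cases h : 2 ≤ l.count x
    · simp [(pv_fold_snd_mem l _ _ x).mpr (Or.inr (Or.inr h)), h]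
    · have hnm : x ∉ (l.foldl pvStep (PySem.Set.empty, PySem.Set.empty)).2 := by
        intro hm
        rcases (pv_fold_snd_mem l _ _ x).mp hm with h' | h' | h' <;> simp_all
      simp [h]
      exact hnm
  rw [h1, h2]
  have hc : 1 ≤ l.count x := List.count_pos_iff.mpr hx
  simp only [Bool.true_and]
  by_cases h : l.count x = 1
  · simp [h]
  · simp [h]; omega

-- ===== VERDICT (by name: the statement is the Claim_ definition above) =====
theorem get_uniq_list_spec : Claim_equal_get_uniq_list := by
  intro l _
  unfold Spec_get_uniq_list
  rw [pv_A_eq, pv_B_eq]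
  exact pv_filter_ofList l _ (fun x h => Nat.le_of_eq (of_decide_eq_true h))
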